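-- pv_equiv track=rewrite | github.com/Spy-Bubble/Learning-Python | 03_Enfoque_1_Búsqueda_en_Grafos/04_ Utilidad_Y_Toma_de_Decisiones/utilidad_decision.py | estrategia_minimax
-- ===== SOURCE A (Python) =====
-- def estrategia_minimax(matriz_pagos):
--     """
--     Encuentra estrategia minimax para juegos de suma cero
--     Args:
--         matriz_pagos: matriz de pagos del jugador maximizador
--     Returns:
--         (estrategia_fila, estrategia_columna, valor)
--     """
--     filas = len(matriz_pagos)
--     columnas = len(matriz_pagos[0])
--
--     # Jugador 1 (filas) maximiza el mínimo
--     max_min = float('-inf')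
--     mejor_fila = 0
--
--     for i in range(filas):
--         min_en_fila = min(matriz_pagos[i])
--         if min_en_fila > max_min:
--             max_min = min_en_fila
--             mejor_fila = i
--
--     # Jugador 2 (columnas) minimiza el máximo
--     min_max = float('inf')
--     mejor_columna = 0
--
--     for j in range(columnas):
--         max_en_columna = max(matriz_pagos[i][j] for i in range(filas))
--         if max_en_columna < min_max:
--             min_max = max_en_columna
--             mejor_columna = j
--
--     return mejor_fila, mejor_columna, matriz_pagos[mejor_fila][mejor_columna]
-- ===== SOURCE B (Python) =====
-- def estrategia_minimax(matriz_pagos):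
--     """
--     Encuentra estrategia minimax para juegos de suma cero.
--     One row-major pass builds row_mins and col_maxes; two vector scans pick
--     the first maximin row and the first minimax column.
--     """
--     col_maxes = list(matriz_pagos[0])
--     row_mins = []
--     for row in matriz_pagos:
--         m = row[0]
--         for v in row[1:]:
--             if v < m:
--                 m = v
--         row_mins.append(m)
--         col_maxes = [w if w > c else c for c, w in zip(col_maxes, row)]
--     mejor_fila = 0
--     for i in range(1, len(row_mins)):
--         if row_mins[i] > row_mins[mejor_fila]:
--             mejor_fila = i
--     mejor_columna = 0
--     for j in range(1, len(col_maxes)):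
--         if col_maxes[j] < col_maxes[mejor_columna]:
--             mejor_columna = j
--     return mejor_fila, mejor_columna, matriz_pagos[mejor_fila][mejor_columna]
-- ===== Notes on version B (the rewrite author's own statement) =====
-- stated objective: alternative
-- what changed: A scans rows for their minima and then, for each column, rescans the whole matrix to compute its maximum with -inf/+inf sentinel loops; B makes one row-major pass that simultaneously builds a row_mins list and an elementwise-max col_maxes list, then picks the first maximin row and first minimax column with two plain vector scans.
import Mathlib
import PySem

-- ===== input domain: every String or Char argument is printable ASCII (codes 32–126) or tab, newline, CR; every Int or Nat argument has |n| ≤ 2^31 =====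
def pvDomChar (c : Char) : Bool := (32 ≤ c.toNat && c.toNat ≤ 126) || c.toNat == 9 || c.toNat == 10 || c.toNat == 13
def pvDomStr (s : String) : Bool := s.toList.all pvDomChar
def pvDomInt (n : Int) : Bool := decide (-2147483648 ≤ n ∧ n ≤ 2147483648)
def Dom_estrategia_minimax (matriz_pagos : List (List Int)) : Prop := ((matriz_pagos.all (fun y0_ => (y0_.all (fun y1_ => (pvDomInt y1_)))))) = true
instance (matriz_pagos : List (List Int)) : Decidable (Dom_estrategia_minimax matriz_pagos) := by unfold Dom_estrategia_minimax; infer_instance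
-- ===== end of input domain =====

-- B replaces A's two separate scans (per-row mins, then per-column maxes recomputed by an inner
-- row scan) with ONE row-major pass that builds row_mins and col_maxes together, followed by two
-- plain argmax/argmin vector scans (objective: alternative decomposition, same asymptotic cost).

-- ===== PORT A =====
-- A's float('-inf')/float('inf') sentinels are ported as `Option Int` with `none` = "no value yet":
-- every Int is > -inf and < inf, so the first iteration always replaces the sentinel, exactly as here.
def estrategia_minimax (matriz_pagos : List (List Int)) : Int × Int × Int :=
  let filas : Int := (matriz_pagos.length : Int)
  let columnas : Int := ((PySem.List.pyGetD matriz_pagos 0 []).length : Int)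
  let rowSt :=
    (PySem.List.pyRange 0 filas 1).foldl
      (fun (st : Option Int × Int) i =>
        let min_en_fila := (PySem.List.min? (PySem.List.pyGetD matriz_pagos i []) (fun y => y)).getD 0
        match st.1 with
        | none => (some min_en_fila, i)
        | some mm => if min_en_fila > mm then (some min_en_fila, i) else st)
      (none, 0)
  let mejor_fila := rowSt.2
  let colSt :=
    (PySem.List.pyRange 0 columnas 1).foldl
      (fun (st : Option Int × Int) j =>
        let max_en_columna :=
          (PySem.List.max?
            ((PySem.List.pyRange 0 filas 1).map
              (fun i => PySem.List.pyGetD (PySem.List.pyGetD matriz_pagos i []) j 0))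
            (fun y => y)).getD 0
        match st.1 with
        | none => (some max_en_columna, j)
        | some mm => if max_en_columna < mm then (some max_en_columna, j) else st)
      (none, 0)
  let mejor_columna := colSt.2
  (mejor_fila, mejor_columna,
    PySem.List.pyGetD (PySem.List.pyGetD matriz_pagos mejor_fila []) mejor_columna 0)

-- ===== PORT B =====
-- Source B's running row minimum: m = row[0]; for v in row[1:]: if v < m: m = v
-- (the [] case is Python's IndexError on row[0], excluded by Pre_; 0 is a dummy value)
def pvRowMin (row : List Int) : Int :=
  match row with
  | [] => 0
  | h :: t => t.foldl (fun m v => if v < m then v else m) h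

def estrategia_minimax_alt (matriz_pagos : List (List Int)) : Int × Int × Int :=
  let st :=
    matriz_pagos.foldl
      (fun (st : List Int × List Int) row =>
        (st.1 ++ [pvRowMin row],
         List.zipWith (fun c w => if w > c then w else c) st.2 row))
      ([], PySem.List.pyGetD matriz_pagos 0 [])
  let row_mins := st.1
  let col_maxes := st.2
  let mejor_fila :=
    (PySem.List.pyRange 1 (row_mins.length : Int) 1).foldl
      (fun b i => if PySem.List.pyGetD row_mins i 0 > PySem.List.pyGetD row_mins b 0 then i else b) 0
  let mejor_columna :=
    (PySem.List.pyRange 1 (col_maxes.length : Int) 1).foldl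
      (fun b j => if PySem.List.pyGetD col_maxes j 0 < PySem.List.pyGetD col_maxes b 0 then j else b) 0
  (mejor_fila, mejor_columna,
    PySem.List.pyGetD (PySem.List.pyGetD matriz_pagos mejor_fila []) mejor_columna 0)

-- ===== PRECONDITION & SPEC =====
-- Pre_ excludes exactly the inputs on which Python A raises: the empty matrix and an empty first
-- row (min()/indexing raise), and matrices with a row shorter than the first row (IndexError in
-- the column scan). Rows longer than the first row are admitted (A ignores the extra columns).
def Pre_estrategia_minimax (matriz_pagos : List (List Int)) : Prop :=
  matriz_pagos ≠ [] ∧ matriz_pagos.headI ≠ [] ∧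
    ∀ r ∈ matriz_pagos, (matriz_pagos.headI).length ≤ r.length
instance (matriz_pagos : List (List Int)) : Decidable (Pre_estrategia_minimax matriz_pagos) := by
  unfold Pre_estrategia_minimax; infer_instance

def pvWitness_estrategia_minimax : List (List Int) := [[1, 2], [3, 0]]

def Spec_estrategia_minimax (matriz_pagos : List (List Int)) (out : Int × Int × Int) : Prop := out = estrategia_minimax_alt matriz_pagos
instance (matriz_pagos : List (List Int)) (out : Int × Int × Int) : Decidable (Spec_estrategia_minimax matriz_pagos out) := by unfold Spec_estrategia_minimax; infer_instance

-- ===== CLAIM (what is proved, stated in full; the proofs are below) =====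
def Claim_equal_estrategia_minimax : Prop := ∀ (matriz_pagos : List (List Int)), Dom_estrategia_minimax matriz_pagos → Pre_estrategia_minimax matriz_pagos → Spec_estrategia_minimax matriz_pagos (estrategia_minimax matriz_pagos)


-- ===== LEMMAS AND PROOFS =====

-- B's pair-state fold splits into two independent folds.
lemma pv_fold_split (mtx : List (List Int)) (a c : List Int) :
    mtx.foldl
      (fun (st : List Int × List Int) row =>
        (st.1 ++ [pvRowMin row],
         List.zipWith (fun c w => if w > c then w else c) st.2 row)) (a, c)
    = (mtx.foldl (fun acc row => acc ++ [pvRowMin row]) a,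
       mtx.foldl (fun cm row => List.zipWith (fun c w => if w > c then w else c) cm row) c) := by
  induction mtx generalizing a c with
  | nil => rfl
  | cons r t ih => simp [List.foldl_cons, ih]

-- B's hand-written running minimum is Python's min(row) on a nonempty row.
lemma pvRowMin_eq (row : List Int) (h : row ≠ []) :
    pvRowMin row = (PySem.List.min? row (fun y => y)).getD 0 := by
  cases row with
  | nil => exact absurd rfl h
  | cons x t =>
    rw [PySem.List.min?_id_cons]
    simp only [pvRowMin, Option.getD_some]
    congr 1
    funext m v
    simp only [min_def]
    split_ifs <;> omega

-- the elementwise zipWith-max fold, read at one column j.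
lemma pv_colfold (rows : List (List Int)) (cm : List Int)
    (h : ∀ r ∈ rows, cm.length ≤ r.length) :
    (rows.foldl (fun cm row => List.zipWith (fun c w => if w > c then w else c) cm row) cm).length
        = cm.length ∧
      ∀ j < cm.length,
        (rows.foldl (fun cm row => List.zipWith (fun c w => if w > c then w else c) cm row) cm).getD j 0
          = rows.foldl (fun acc row => if row.getD j 0 > acc then row.getD j 0 else acc) (cm.getD j 0) := by
  induction rows generalizing cm with
  | nil => exact ⟨rfl, fun j hj => rfl⟩
  | cons r t ih =>
    have hr : cm.length ≤ r.length := h r (by simp)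
    have hz : (List.zipWith (fun c w => if w > c then w else c) cm r).length = cm.length := by
      simp [List.length_zipWith]; omega
    have ht : ∀ r' ∈ t, (List.zipWith (fun c w => if w > c then w else c) cm r).length ≤ r'.length := by
      intro r' hr'; rw [hz]; exact h r' (by simp [hr'])
    obtain ⟨ih1, ih2⟩ := ih _ ht
    constructor
    · simpa [List.foldl_cons, hz] using ih1
    · intro j hj
      rw [List.foldl_cons, List.foldl_cons, ih2 j (by omega)]
      congr 1
      have hj1 : j < (List.zipWith (fun c w => if w > c then w else c) cm r).length := by omega
      rw [List.getD_eq_getElem _ _ hj1, List.getD_eq_getElem _ _ hj,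
          List.getD_eq_getElem _ _ (by omega : j < r.length), List.getElem_zipWith]

-- the shared shape of A's sentinel loop and B's index scan: A's fold over range(0, n) with an
-- Option sentinel lands on (some (v b), b) where b is B's fold over range(1, n).
lemma pv_scan (v : Int → Int) (r : Int → Int → Prop) [DecidableRel r] (n : Int) (hn : 1 ≤ n) :
    (PySem.List.pyRange 0 n 1).foldl
      (fun (st : Option Int × Int) i =>
        match st.1 with
        | none => (some (v i), i)
        | some mm => if r (v i) mm then (some (v i), i) else st)
      (none, 0)
    = (some (v ((PySem.List.pyRange 1 n 1).foldl (fun b i => if r (v i) (v b) then i else b) 0)),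
       (PySem.List.pyRange 1 n 1).foldl (fun b i => if r (v i) (v b) then i else b) 0) := by
  induction n, hn using Int.le_induction with
  | base =>
    have h1 : PySem.List.pyRange 0 1 1 = [0] := by
      simpa using PySem.List.pyRange_one_singleton (a := 0)
    rw [h1, PySem.List.pyRange_one_eq_nil (by omega : (1:Int) ≤ 1)]
    rfl
  | succ n hn ih =>
    rw [PySem.List.pyRange_one_succ_right (by omega : (0:Int) ≤ n),
        PySem.List.pyRange_one_succ_right (by omega : (1:Int) ≤ n),
        List.foldl_append, List.foldl_append, ih]
    simp only [List.foldl_cons, List.foldl_nil]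
    split_ifs <;> rfl

theorem estrategia_minimax_spec : Claim_equal_estrategia_minimax := by
  intro m _ hpre
  obtain ⟨hne, hr0h, hlenh⟩ := hpre
  cases m with
  | nil => exact absurd rfl hne
  | cons r0 rest =>
  have hr0 : r0 ≠ [] := by simpa using hr0h
  have hlen : ∀ r ∈ (r0 :: rest), r0.length ≤ r.length := by simpa using hlenh
  have hr0len : 0 < r0.length := List.length_pos_of_ne_nil hr0
  show estrategia_minimax (r0 :: rest) = estrategia_minimax_alt (r0 :: rest)
  simp only [estrategia_minimax, estrategia_minimax_alt]
  rw [PySem.List.pyGetD_zero_cons, pv_fold_split, PySem.List.foldl_append_singleton_eq_map]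
  simp only [List.nil_append]
  set RMS := List.map pvRowMin (r0 :: rest) with hRMS
  set CM := List.foldl (fun cm row => List.zipWith (fun c w => if w > c then w else c) cm row) r0
      (r0 :: rest) with hCM
  obtain ⟨hCMlen, hCMget⟩ := pv_colfold (r0 :: rest) r0 hlen
  rw [← hCM] at hCMlen hCMget
  have hRMSlen : RMS.length = (r0 :: rest).length := by simp [hRMS]
  -- A's per-row minimum equals B's row_mins entry
  have hV : ∀ i : Int, 0 ≤ i → i < ((r0 :: rest).length : Int) →
      (PySem.List.min? (PySem.List.pyGetD (r0 :: rest) i []) fun y => y).getD 0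
        = PySem.List.pyGetD RMS i 0 := by
    intro i h0 h1
    have hi : i.toNat < (r0 :: rest).length := by omega
    have hiR : i < (RMS.length : Int) := by rw [hRMSlen]; exact h1
    rw [PySem.List.pyGetD_eq_getElem _ _ h0 h1, PySem.List.pyGetD_eq_getElem _ _ h0 hiR]
    simp only [hRMS, List.getElem_map]
    have hmem : (r0 :: rest)[i.toNat] ∈ (r0 :: rest) := List.getElem_mem _
    have hnn : (r0 :: rest)[i.toNat] ≠ [] := by
      have := hlen _ hmem
      exact List.ne_nil_of_length_pos (by omega)
    rw [pvRowMin_eq _ hnn]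
  -- A's per-column maximum equals B's col_maxes entry
  have hW : ∀ j : Int, 0 ≤ j → j < (r0.length : Int) →
      (PySem.List.max?
          (List.map (fun i => PySem.List.pyGetD (PySem.List.pyGetD (r0 :: rest) i []) j 0)
            (PySem.List.pyRange 0 ((r0 :: rest).length : Int)))
          fun y => y).getD 0
        = PySem.List.pyGetD CM j 0 := by
    intro j h0 h1
    have hjn : j.toNat < r0.length := by omega
    have hmapcol : List.map (fun i => PySem.List.pyGetD (PySem.List.pyGetD (r0 :: rest) i []) j 0)
        (PySem.List.pyRange 0 ((r0 :: rest).length : Int))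
        = List.map (fun row => PySem.List.pyGetD row j 0) (r0 :: rest) := by
      rw [show (fun i => PySem.List.pyGetD (PySem.List.pyGetD (r0 :: rest) i []) j 0)
            = (fun row => PySem.List.pyGetD row j 0) ∘ (fun i => PySem.List.pyGetD (r0 :: rest) i ([] : List Int))
          from rfl]
      rw [← List.map_map, PySem.List.map_pyGetD_pyRange_zero']
    rw [hmapcol, List.map_cons, PySem.List.max?_id_cons, Option.getD_some, List.foldl_map]
    have hjC : j < (CM.length : Int) := by rw [hCMlen]; exact h1
    have hjCn : j.toNat < CM.length := by omega
    rw [PySem.List.pyGetD_eq_getElem _ _ h0 hjC, ← List.getD_eq_getElem CM 0 hjCn,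
        hCMget j.toNat hjn, List.foldl_cons]
    have hpy : ∀ r : List Int, r ∈ (r0 :: rest) → PySem.List.pyGetD r j 0 = r.getD j.toNat 0 := by
      intro r hr
      have hlr : j < (r.length : Int) := by
        have := hlen r hr; omega
      rw [PySem.List.pyGetD_eq_getElem _ _ h0 hlr, List.getD_eq_getElem r 0 (by omega)]
    rw [if_neg (lt_irrefl _), ← hpy r0 (by simp)]
    refine PySem.List.foldl_congr_mem _ _ _ _ ?_
    intro acc r hr
    rw [hpy r (by simp [hr])]
    simp only [max_def]
    split_ifs <;> omega
  -- both selection loops have the shared scan shape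
  have hn1 : (1 : Int) ≤ ((r0 :: rest).length : Int) := by
    have : 0 < (r0 :: rest).length := by simp
    omega
  have hc1 : (1 : Int) ≤ (r0.length : Int) := by omega
  have hA1 :
      List.foldl
        (fun (st : Option Int × Int) i =>
          match st.1 with
          | none => (some ((PySem.List.min? (PySem.List.pyGetD (r0 :: rest) i []) fun y => y).getD 0), i)
          | some mm =>
            if (PySem.List.min? (PySem.List.pyGetD (r0 :: rest) i []) fun y => y).getD 0 > mm then
              (some ((PySem.List.min? (PySem.List.pyGetD (r0 :: rest) i []) fun y => y).getD 0), i)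
            else st)
        (none, 0) (PySem.List.pyRange 0 ((r0 :: rest).length : Int))
      = List.foldl
        (fun (st : Option Int × Int) i =>
          match st.1 with
          | none => (some (PySem.List.pyGetD RMS i 0), i)
          | some mm =>
            if PySem.List.pyGetD RMS i 0 > mm then (some (PySem.List.pyGetD RMS i 0), i) else st)
        (none, 0) (PySem.List.pyRange 0 ((r0 :: rest).length : Int)) := by
    refine PySem.List.foldl_congr_mem _ _ _ _ ?_
    intro acc x hx
    obtain ⟨hx0, hx1⟩ := PySem.List.mem_pyRange_one.mp hx
    rw [hV x hx0 hx1]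
  have hA2 :
      List.foldl
        (fun (st : Option Int × Int) j =>
          match st.1 with
          | none =>
            (some ((PySem.List.max?
                (List.map (fun i => PySem.List.pyGetD (PySem.List.pyGetD (r0 :: rest) i []) j 0)
                  (PySem.List.pyRange 0 ((r0 :: rest).length : Int)))
                fun y => y).getD 0), j)
          | some mm =>
            if (PySem.List.max?
                (List.map (fun i => PySem.List.pyGetD (PySem.List.pyGetD (r0 :: rest) i []) j 0)
                  (PySem.List.pyRange 0 ((r0 :: rest).length : Int)))
                fun y => y).getD 0 < mm then
              (some ((PySem.List.max?
                  (List.map (fun i => PySem.List.pyGetD (PySem.List.pyGetD (r0 :: rest) i []) j 0)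
                    (PySem.List.pyRange 0 ((r0 :: rest).length : Int)))
                  fun y => y).getD 0), j)
            else st)
        (none, 0) (PySem.List.pyRange 0 ((r0.length : Int)))
      = List.foldl
        (fun (st : Option Int × Int) j =>
          match st.1 with
          | none => (some (PySem.List.pyGetD CM j 0), j)
          | some mm =>
            if PySem.List.pyGetD CM j 0 < mm then (some (PySem.List.pyGetD CM j 0), j) else st)
        (none, 0) (PySem.List.pyRange 0 ((r0.length : Int))) := by
    refine PySem.List.foldl_congr_mem _ _ _ _ ?_
    intro acc x hx
    obtain ⟨hx0, hx1⟩ := PySem.List.mem_pyRange_one.mp hx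
    rw [hW x hx0 hx1]
  rw [hA1, hA2,
      pv_scan (fun i => PySem.List.pyGetD RMS i 0) (· > ·) ((r0 :: rest).length : Int) hn1,
      pv_scan (fun j => PySem.List.pyGetD CM j 0) (· < ·) ((r0.length : Int)) hc1,
      hRMSlen, hCMlen]
  rfl
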